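-- pv_equiv track=rewrite | github.com/FyzHsn/python-exercises | combinatorics/explore.py | two_list_permutation
-- ===== SOURCE A (Python) =====
-- def two_list_permutation(l1, l2, circular=False):
--     permutations = []
--     all_non_circular_permutations = []
--
--     for e1 in l1:
--         for e2 in l2:
--             if (e1 not in e2) and (e2 not in e1):
--                 permutation = e1 + e2
--
--                 if (circular and permutation not in
--                         all_non_circular_permutations) or not circular:
--                     permutations.append(permutation)
--
--                 all_non_circular_permutations += \
--                     circular_variations(permutation)
--
--     return permutations
--
-- def circular_variations(permutation):
--     variations = [permutation]
--
--     for i in range(1, len(permutation)):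
--         variations.append(variations[i - 1][-1] + variations[i - 1][0:-1])
--
--     return variations
-- ===== SOURCE B (Python) =====
-- def two_list_permutation(l1, l2, circular=False):
--     permutations = []
--     seen = set()
--
--     for e1 in l1:
--         for e2 in l2:
--             if (e1 not in e2) and (e2 not in e1):
--                 permutation = e1 + e2
--                 if circular:
--                     key = min(permutation[k:] + permutation[:k]
--                               for k in range(len(permutation)))
--                     if key not in seen:
--                         permutations.append(permutation)
--                     seen.add(key)
--                 else:
--                     permutations.append(permutation)
--
--     return permutations
-- ===== Notes on version B (the rewrite author's own statement) =====
-- stated objective: faster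
-- what changed: Replaces A's growing list of every rotation of every emitted permutation (scanned linearly per candidate) with a set of canonical minimal-rotation keys, one O(L^2) key per candidate and an O(1) set lookup; the circular_variations helper disappears.
import Mathlib
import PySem

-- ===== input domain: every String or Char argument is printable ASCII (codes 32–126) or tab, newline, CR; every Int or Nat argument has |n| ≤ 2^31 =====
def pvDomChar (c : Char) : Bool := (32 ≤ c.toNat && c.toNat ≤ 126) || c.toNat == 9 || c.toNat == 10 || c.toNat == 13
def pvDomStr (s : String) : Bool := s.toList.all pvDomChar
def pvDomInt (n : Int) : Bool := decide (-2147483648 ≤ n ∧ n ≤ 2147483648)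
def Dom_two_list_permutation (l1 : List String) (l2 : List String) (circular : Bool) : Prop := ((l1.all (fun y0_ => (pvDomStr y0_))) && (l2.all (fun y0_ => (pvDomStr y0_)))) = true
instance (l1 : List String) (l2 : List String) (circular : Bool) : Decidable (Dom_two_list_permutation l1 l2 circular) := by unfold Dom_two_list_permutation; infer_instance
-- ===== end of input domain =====

-- B replaces A's ever-growing list of all rotations of every emitted permutation by a set of
-- canonical minimal-rotation keys, one key per candidate (objective: faster).

-- ===== PORT A =====
-- loop body of circular_variations: variations[i-1][-1] + variations[i-1][0:-1]
-- (the pyGetD defaults are only reached where Python's own indexing would raise, which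
-- two_list_permutation never causes: every permutation it passes down is nonempty)
def cvStep (vars : List (List Char)) (i : Int) : List (List Char) :=
  let prev := PySem.List.pyGetD vars (i - 1) []
  vars ++ [PySem.List.pyGetD prev (-1) ' ' :: PySem.List.slice prev (some 0) (some (-1))]

def circular_variations (p : List Char) : List (List Char) :=
  (PySem.List.pyRange 1 (p.length : Int) 1).foldl cvStep [p]

def two_list_permutation (l1 : List String) (l2 : List String) (circular : Bool) : List String :=
  (l1.foldl (fun st e1 =>
    l2.foldl (fun (st : List (List Char) × List (List Char)) e2 =>
      if !(PySem.Str.isIn e1 e2) && !(PySem.Str.isIn e2 e1) then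
        let permutation := e1.toList ++ e2.toList
        let perms := if (circular && !(decide (permutation ∈ st.2))) || !circular
                     then st.1 ++ [permutation] else st.1
        (perms, st.2 ++ circular_variations permutation)
      else st) st)
    ([], [])).1.map (fun cs => String.ofList cs)

-- ===== PORT B =====
-- min(permutation[k:] + permutation[:k] for k in range(len(permutation))); the getD default is
-- only reached for p = [], where Python's min would raise — never the case at the call site below
def canonical_key (p : List Char) : List Char :=
  (PySem.List.min? ((PySem.List.pyRange 0 (p.length : Int) 1).map
      (fun k => PySem.List.slice p (some k) none ++ PySem.List.slice p none (some k)))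
    (fun x => x)).getD p

def two_list_permutation_alt (l1 : List String) (l2 : List String) (circular : Bool) : List String :=
  (l1.foldl (fun st e1 =>
    l2.foldl (fun (st : List (List Char) × PySem.Set (List Char)) e2 =>
      if !(PySem.Str.isIn e1 e2) && !(PySem.Str.isIn e2 e1) then
        let permutation := e1.toList ++ e2.toList
        if circular then
          let key := canonical_key permutation
          let perms := if decide (key ∈ st.2) then st.1 else st.1 ++ [permutation]
          (perms, PySem.Set.add st.2 key)
        else (st.1 ++ [permutation], st.2)
      else st) st)
    ([], PySem.Set.empty)).1.map (fun cs => String.ofList cs)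

-- ===== PRECONDITION & SPEC =====
def Spec_two_list_permutation (l1 : List String) (l2 : List String) (circular : Bool) (out : List String) : Prop := out = two_list_permutation_alt l1 l2 circular
instance (l1 : List String) (l2 : List String) (circular : Bool) (out : List String) : Decidable (Spec_two_list_permutation l1 l2 circular out) := by unfold Spec_two_list_permutation; infer_instance

-- ===== CLAIM (what is proved, stated in full; the proofs are below) =====
def Claim_equal_two_list_permutation : Prop := ∀ (l1 : List String) (l2 : List String) (circular : Bool), Dom_two_list_permutation l1 l2 circular → Spec_two_list_permutation l1 l2 circular (two_list_permutation l1 l2 circular)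

-- ===== LEMMAS AND PROOFS =====

-- one right-rotation, as A's circular_variations loop body computes it
def rotr (q : List Char) : List Char :=
  PySem.List.pyGetD q (-1) ' ' :: PySem.List.slice q (some 0) (some (-1))

theorem cvStep_eq (vars : List (List Char)) (i : Int) (hv : vars ≠ []) (hi : i = (vars.length : Int)) :
    cvStep vars i = vars ++ [rotr (vars.getLast hv)] := by
  have hlen1 : 0 < vars.length := List.length_pos_of_ne_nil hv
  unfold cvStep rotr
  have h1 : PySem.List.pyGetD vars (i - 1) [] = vars.getLast hv := by
    rw [PySem.List.pyGetD_eq_getElem vars [] (by omega) (by omega)]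
    rw [List.getLast_eq_getElem]
    congr 1
    omega
  rw [h1]

theorem getLast_map_range (f : Nat → List Char) (m : Nat) (h : (List.range (m+1)).map f ≠ []) :
    ((List.range (m+1)).map f).getLast h = f m := by
  rw [List.getLast_eq_getElem]
  simp

theorem cv_fold (m : Nat) (vars : List (List Char)) (q : List Char)
    (hlast : vars.getLast? = some q) :
    (PySem.List.pyRange (vars.length : Int) ((vars.length : Int) + m) 1).foldl cvStep vars
      = vars ++ (List.range m).map (fun j => rotr^[j+1] q) := by
  induction m with
  | zero =>
    simp only [Nat.cast_zero, add_zero, List.range_zero, List.map_nil, List.append_nil]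
    rw [PySem.List.pyRange_one_eq_nil le_rfl]
    rfl
  | succ m ih =>
    have hv : vars ≠ [] := by rintro rfl; simp at hlast
    have hsplit : ((vars.length : Int) + (m+1 : Nat)) = ((vars.length : Int) + m) + 1 := by push_cast; ring
    rw [hsplit, PySem.List.pyRange_one_succ_right (by omega), List.foldl_append, ih]
    have hne : vars ++ (List.range m).map (fun j => rotr^[j+1] q) ≠ [] := by simp [hv]
    have hlen : ((vars ++ (List.range m).map (fun j => rotr^[j+1] q)).length : Int) = (vars.length : Int) + m := by
      simp
    simp only [List.foldl_cons, List.foldl_nil]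
    rw [cvStep_eq _ _ hne (by rw [hlen])]
    have hlast2 : (vars ++ (List.range m).map (fun j => rotr^[j+1] q)).getLast hne = rotr^[m] q := by
      cases m with
      | zero =>
        simp only [List.range_zero, List.map_nil, List.append_nil, Function.iterate_zero, id]
        rw [List.getLast_eq_iff_getLast?_eq_some]
        exact hlast
      | succ m =>
        rw [List.getLast_append_of_ne_nil (by simp)]
        rw [getLast_map_range]
        simp
    rw [hlast2, List.range_succ, List.map_append, ← List.append_assoc]
    simp [Function.iterate_succ_apply']

theorem rotr_eq_rotate (q : List Char) (hq : q ≠ []) :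
    rotr q = q.rotate (q.length - 1) := by
  unfold rotr
  rw [PySem.List.pyGetD_neg_one q ' ' hq, PySem.List.slice_zero_start, PySem.List.slice_to_neg_one,
    List.rotate_eq_drop_append_take (by omega), List.drop_length_sub_one hq, List.dropLast_eq_take]
  rfl

theorem cv_eq (p : List Char) (hp : p ≠ []) :
    circular_variations p = (List.range p.length).map (fun j => rotr^[j] p) := by
  have hn : 0 < p.length := List.length_pos_of_ne_nil hp
  unfold circular_variations
  have h1 : (p.length : Int) = (([p] : List (List Char)).length : Int) + ((p.length - 1 : Nat) : Int) := by
    simp; omega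
  rw [h1]
  have h0 : PySem.List.pyRange 1 ((([p] : List (List Char)).length : Int) + ((p.length - 1 : Nat) : Int)) 1
      = PySem.List.pyRange (([p] : List (List Char)).length : Int) ((([p] : List (List Char)).length : Int) + ((p.length - 1 : Nat) : Int)) 1 := by
    norm_num
  rw [h0, cv_fold (p.length - 1) [p] p (by simp)]
  have h2 : p.length = (p.length - 1) + 1 := by omega
  rw [h2, List.range_succ_eq_map]
  simp [Function.comp_def]

theorem iterate_rotr (p : List Char) (hp : p ≠ []) (j : Nat) :
    rotr^[j] p = p.rotate ((p.length - 1) * j) := by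
  induction j with
  | zero => simp
  | succ j ih =>
    rw [Function.iterate_succ_apply', ih,
      rotr_eq_rotate _ (by simp [List.rotate_eq_nil_iff]; rintro rfl; exact hp rfl)]
    rw [List.length_rotate, List.rotate_rotate]
    ring_nf

theorem mem_cv_iff (p : List Char) (hp : p ≠ []) (x : List Char) :
    x ∈ circular_variations p ↔ p ~r x := by
  have hn : 0 < p.length := List.length_pos_of_ne_nil hp
  rw [cv_eq p hp]
  simp only [List.mem_map, List.mem_range]
  constructor
  · rintro ⟨j, hj, rfl⟩
    exact ⟨(p.length - 1) * j, (iterate_rotr p hp j).symm⟩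
  · rintro ⟨k, rfl⟩
    have hrlt : k % p.length < p.length := Nat.mod_lt _ hn
    refine ⟨(p.length - (k % p.length)) % p.length, Nat.mod_lt _ hn, ?_⟩
    rw [iterate_rotr p hp]
    have h2 : (p.length - 1) * (p.length - k % p.length)
        = p.length * (p.length - k % p.length - 1) + k % p.length := by
      zify [show k % p.length ≤ p.length from hrlt.le, show 1 ≤ p.length from hn,
        show 1 ≤ p.length - k % p.length from by omega]
      ring
    have key : ((p.length - 1) * ((p.length - k % p.length) % p.length)) % p.length
        = k % p.length := by
      have h1 : (p.length - 1) * ((p.length - k % p.length) % p.length) % p.length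
          = (p.length - 1) * (p.length - k % p.length) % p.length :=
        Nat.ModEq.mul_left _ (Nat.mod_modEq _ _)
      rw [h1, h2, mul_comm p.length _, add_comm, Nat.add_mul_mod_self_right]
      simp
    calc p.rotate ((p.length - 1) * ((p.length - k % p.length) % p.length))
        = p.rotate (((p.length - 1) * ((p.length - k % p.length) % p.length)) % p.length) :=
          (List.rotate_mod _ _).symm
      _ = p.rotate (k % p.length) := by rw [key]
      _ = p.rotate k := List.rotate_mod _ _

def rots (p : List Char) : List (List Char) := (List.range p.length).map (p.rotate ·)

theorem canonical_key_eq (p : List Char) :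
    canonical_key p = (PySem.List.min? (rots p) (fun x => x)).getD p := by
  unfold canonical_key rots
  congr 1
  congr 1
  rw [PySem.List.pyRange_zero_nat, List.map_map]
  refine List.map_congr_left ?_
  intro k hk
  simp only [List.mem_range] at hk
  simp only [Function.comp]
  rw [PySem.List.slice_from_natCast, PySem.List.slice_to_natCast,
    ← List.rotate_eq_drop_append_take (le_of_lt hk)]

theorem min?_le_of_mem (xs : List (List Char)) (m : List Char)
    (h : PySem.List.min? xs (fun x => x) = some m) : ∀ y ∈ xs, m ≤ y := by
  have hinst : (LinearOrder.toDecidableLT : DecidableLT (List Char)) = (fun a b => a.decidableLT b) :=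
    Subsingleton.elim _ _
  have h' : @PySem.List.min? (List Char) (List Char) List.instLinearOrder.toLT
      LinearOrder.toDecidableLT xs (fun x => x) = some m := by
    rw [hinst]; exact h
  have := PySem.List.min?_isMin h'
  simpa using this

theorem min?_eq_of_mem_iff (xs ys : List (List Char)) (hx : xs ≠ []) (hy : ys ≠ [])
    (h : ∀ z, z ∈ xs ↔ z ∈ ys) :
    PySem.List.min? xs (fun x => x) = PySem.List.min? ys (fun x => x) := by
  obtain ⟨m1, hm1⟩ : ∃ m, PySem.List.min? xs (fun x => x) = some m := by
    cases h1 : PySem.List.min? xs (fun x => x) with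
    | none => exact absurd ((PySem.List.min?_eq_none_iff _ _).mp h1) hx
    | some m => exact ⟨m, rfl⟩
  obtain ⟨m2, hm2⟩ : ∃ m, PySem.List.min? ys (fun x => x) = some m := by
    cases h1 : PySem.List.min? ys (fun x => x) with
    | none => exact absurd ((PySem.List.min?_eq_none_iff _ _).mp h1) hy
    | some m => exact ⟨m, rfl⟩
  rw [hm1, hm2]
  have h12 : m1 ≤ m2 := min?_le_of_mem xs m1 hm1 m2 ((h m2).mpr (PySem.List.min?_mem hm2))
  have h21 : m2 ≤ m1 := min?_le_of_mem ys m2 hm2 m1 ((h m1).mp (PySem.List.min?_mem hm1))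
  exact congrArg some (le_antisymm h12 h21)

theorem rots_ne_nil (p : List Char) (hp : p ≠ []) : rots p ≠ [] := by
  unfold rots
  simp [Nat.pos_iff_ne_zero.mp (List.length_pos_of_ne_nil hp)]

theorem mem_rots_iff (p x : List Char) (hp : p ≠ []) : x ∈ rots p ↔ p ~r x := by
  have hn : 0 < p.length := List.length_pos_of_ne_nil hp
  unfold rots
  simp only [List.mem_map, List.mem_range]
  constructor
  · rintro ⟨k, hk, rfl⟩; exact ⟨k, rfl⟩
  · rintro ⟨k, rfl⟩
    exact ⟨k % p.length, Nat.mod_lt _ hn, List.rotate_mod _ _⟩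

theorem canonical_key_rot (p : List Char) (hp : p ≠ []) : p ~r canonical_key p := by
  rw [canonical_key_eq]
  cases h : PySem.List.min? (rots p) (fun x => x) with
  | none => exact absurd ((PySem.List.min?_eq_none_iff _ _).mp h) (rots_ne_nil p hp)
  | some m =>
    simp only [Option.getD_some]
    exact (mem_rots_iff p m hp).mp (PySem.List.min?_mem h)

theorem canonical_key_invariant (p q : List Char) (hp : p ≠ []) (hq : q ≠ [])
    (h : p ~r q) : canonical_key p = canonical_key q := by
  rw [canonical_key_eq, canonical_key_eq]
  have hmem : ∀ z, z ∈ rots p ↔ z ∈ rots q := by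
    intro z
    rw [mem_rots_iff p z hp, mem_rots_iff q z hq]
    exact ⟨fun h' => h.symm.trans h', fun h' => h.trans h'⟩
  rw [min?_eq_of_mem_iff (rots p) (rots q) (rots_ne_nil p hp) (rots_ne_nil q hq) hmem]
  cases h1 : PySem.List.min? (rots q) (fun x => x) with
  | none => exact absurd ((PySem.List.min?_eq_none_iff _ _).mp h1) (rots_ne_nil q hq)
  | some m => rfl

theorem canonical_key_eq_iff (p q : List Char) (hp : p ≠ []) (hq : q ≠ []) :
    canonical_key p = canonical_key q ↔ p ~r q := by
  constructor
  · intro h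
    exact (canonical_key_rot p hp).trans (h ▸ (canonical_key_rot q hq).symm)
  · exact canonical_key_invariant p q hp hq

theorem perm_ne_nil (e1 e2 : String)
    (h : (!(PySem.Str.isIn e1 e2) && !(PySem.Str.isIn e2 e1)) = true) :
    e1.toList ++ e2.toList ≠ [] := by
  intro hnil
  have h1 : e1.toList = [] := by
    rcases List.append_eq_nil_iff.mp hnil with ⟨ha, _⟩; exact ha
  have h2 : PySem.Str.isIn e1 e2 = true := by
    simp only [PySem.Str.isIn_eq, h1]
    exact (PySem.Chars.isIn_iff_infix _ _).mpr List.nil_infix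
  rw [h2] at h
  simp at h

theorem mem_flatMap_cv_iff (qs : List (List Char)) (hqs : ∀ q ∈ qs, q ≠ [])
    (p : List Char) (hp : p ≠ []) :
    (p ∈ qs.flatMap circular_variations) ↔
      canonical_key p ∈ PySem.Set.ofList (qs.map canonical_key) := by
  rw [PySem.Set.mem_ofList]
  simp only [List.mem_flatMap, List.mem_map]
  constructor
  · rintro ⟨q, hq, hmem⟩
    refine ⟨q, hq, ?_⟩
    exact canonical_key_invariant q p (hqs q hq) hp ((mem_cv_iff q (hqs q hq) p).mp hmem)
  · rintro ⟨q, hq, hkey⟩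
    refine ⟨q, hq, ?_⟩
    exact (mem_cv_iff q (hqs q hq) p).mpr
      ((canonical_key_eq_iff q p (hqs q hq) hp).mp hkey)

def innerA (circular : Bool) (e1 : String)
    (st : List (List Char) × List (List Char)) (e2 : String) :
    List (List Char) × List (List Char) :=
  if !(PySem.Str.isIn e1 e2) && !(PySem.Str.isIn e2 e1) then
    let permutation := e1.toList ++ e2.toList
    let perms := if (circular && !(decide (permutation ∈ st.2))) || !circular
                 then st.1 ++ [permutation] else st.1
    (perms, st.2 ++ circular_variations permutation)
  else st

def innerB (circular : Bool) (e1 : String)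
    (st : List (List Char) × PySem.Set (List Char)) (e2 : String) :
    List (List Char) × PySem.Set (List Char) :=
  if !(PySem.Str.isIn e1 e2) && !(PySem.Str.isIn e2 e1) then
    let permutation := e1.toList ++ e2.toList
    if circular then
      let key := canonical_key permutation
      let perms := if decide (key ∈ st.2) then st.1 else st.1 ++ [permutation]
      (perms, PySem.Set.add st.2 key)
    else (st.1 ++ [permutation], st.2)
  else st

theorem inner_true (e1 : String) (l2 : List String)
    (stA : List (List Char) × List (List Char)) (stB : List (List Char) × PySem.Set (List Char))
    (qs : List (List Char)) (hqs : ∀ q ∈ qs, q ≠ [])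
    (h1 : stA.1 = stB.1) (h2 : stA.2 = qs.flatMap circular_variations)
    (h3 : stB.2 = PySem.Set.ofList (qs.map canonical_key)) :
    ∃ qs' : List (List Char), (∀ q ∈ qs', q ≠ []) ∧
      (l2.foldl (innerA true e1) stA).1 = (l2.foldl (innerB true e1) stB).1 ∧
      (l2.foldl (innerA true e1) stA).2 = qs'.flatMap circular_variations ∧
      (l2.foldl (innerB true e1) stB).2 = PySem.Set.ofList (qs'.map canonical_key) := by
  induction l2 generalizing stA stB qs with
  | nil => exact ⟨qs, hqs, h1, h2, h3⟩
  | cons e2 t ih =>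
    simp only [List.foldl_cons]
    by_cases hc : (!(PySem.Str.isIn e1 e2) && !(PySem.Str.isIn e2 e1)) = true
    · have hp : e1.toList ++ e2.toList ≠ [] := perm_ne_nil e1 e2 hc
      have hmem : (e1.toList ++ e2.toList ∈ stA.2) ↔
          canonical_key (e1.toList ++ e2.toList) ∈ stB.2 := by
        rw [h2, h3]; exact mem_flatMap_cv_iff qs hqs _ hp
      refine ih (innerA true e1 stA e2) (innerB true e1 stB e2)
        (qs ++ [e1.toList ++ e2.toList]) ?_ ?_ ?_ ?_
      · intro q hq
        rcases List.mem_append.mp hq with h | h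
        · exact hqs q h
        · simp only [List.mem_singleton] at h; subst h; exact hp
      · unfold innerA innerB
        rw [if_pos hc, if_pos hc]
        simp only [if_true]
        by_cases hin : e1.toList ++ e2.toList ∈ stA.2
        · have hin' : canonical_key (e1.toList ++ e2.toList) ∈ stB.2 := hmem.mp hin
          simp [hin, hin', h1]
        · have hin' : canonical_key (e1.toList ++ e2.toList) ∉ stB.2 := fun hx => hin (hmem.mpr hx)
          simp [hin, hin', h1]
      · unfold innerA
        rw [if_pos hc]
        simp only
        rw [h2, List.flatMap_append]
        simp [List.flatMap]
      · unfold innerB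
        rw [if_pos hc]
        simp only [if_true]
        rw [h3, List.map_append]
        simp only [List.map_cons, List.map_nil]
        rw [PySem.Set.ofList_eq_foldl, PySem.Set.ofList_eq_foldl, List.foldl_append]
        simp
    · have hA : innerA true e1 stA e2 = stA := by unfold innerA; rw [if_neg hc]
      have hB : innerB true e1 stB e2 = stB := by unfold innerB; rw [if_neg hc]
      rw [hA, hB]
      exact ih stA stB qs hqs h1 h2 h3

theorem outer_true (l1 l2 : List String)
    (stA : List (List Char) × List (List Char)) (stB : List (List Char) × PySem.Set (List Char))
    (qs : List (List Char)) (hqs : ∀ q ∈ qs, q ≠ [])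
    (h1 : stA.1 = stB.1) (h2 : stA.2 = qs.flatMap circular_variations)
    (h3 : stB.2 = PySem.Set.ofList (qs.map canonical_key)) :
    (l1.foldl (fun st e1 => l2.foldl (innerA true e1) st) stA).1
      = (l1.foldl (fun st e1 => l2.foldl (innerB true e1) st) stB).1 := by
  induction l1 generalizing stA stB qs with
  | nil => exact h1
  | cons e1 t ih =>
    simp only [List.foldl_cons]
    obtain ⟨qs', hqs', h1', h2', h3'⟩ := inner_true e1 l2 stA stB qs hqs h1 h2 h3
    exact ih _ _ qs' hqs' h1' h2' h3'

theorem inner_false (e1 : String) (l2 : List String)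
    (stA : List (List Char) × List (List Char)) (stB : List (List Char) × PySem.Set (List Char))
    (h1 : stA.1 = stB.1) :
    (l2.foldl (innerA false e1) stA).1 = (l2.foldl (innerB false e1) stB).1 := by
  induction l2 generalizing stA stB with
  | nil => exact h1
  | cons e2 t ih =>
    simp only [List.foldl_cons]
    by_cases hc : (!(PySem.Str.isIn e1 e2) && !(PySem.Str.isIn e2 e1)) = true
    · refine ih (innerA false e1 stA e2) (innerB false e1 stB e2) ?_
      unfold innerA innerB
      rw [if_pos hc, if_pos hc]
      simp [h1]
    · have hA : innerA false e1 stA e2 = stA := by unfold innerA; rw [if_neg hc]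
      have hB : innerB false e1 stB e2 = stB := by unfold innerB; rw [if_neg hc]
      rw [hA, hB]
      exact ih stA stB h1

theorem outer_false (l1 l2 : List String)
    (stA : List (List Char) × List (List Char)) (stB : List (List Char) × PySem.Set (List Char))
    (h1 : stA.1 = stB.1) :
    (l1.foldl (fun st e1 => l2.foldl (innerA false e1) st) stA).1
      = (l1.foldl (fun st e1 => l2.foldl (innerB false e1) st) stB).1 := by
  induction l1 generalizing stA stB with
  | nil => exact h1
  | cons e1 t ih =>
    simp only [List.foldl_cons]
    exact ih _ _ (inner_false e1 l2 stA stB h1)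

theorem two_eq (l1 l2 : List String) (c : Bool) :
    two_list_permutation l1 l2 c
      = ((l1.foldl (fun st e1 => l2.foldl (innerA c e1) st) ([], [])).1).map (fun cs => String.ofList cs) := rfl

theorem two_alt_eq (l1 l2 : List String) (c : Bool) :
    two_list_permutation_alt l1 l2 c
      = ((l1.foldl (fun st e1 => l2.foldl (innerB c e1) st) ([], PySem.Set.empty)).1).map (fun cs => String.ofList cs) := rfl

theorem final (l1 l2 : List String) (c : Bool) :
    two_list_permutation l1 l2 c = two_list_permutation_alt l1 l2 c := by
  rw [two_eq, two_alt_eq]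
  congr 1
  cases c with
  | false => exact outer_false l1 l2 ([], []) ([], PySem.Set.empty) rfl
  | true => exact outer_true l1 l2 ([], []) ([], PySem.Set.empty) [] (by simp) rfl rfl rfl

-- ===== VERDICT (by name: the statement is the Claim_ definition above) =====
theorem two_list_permutation_spec : Claim_equal_two_list_permutation := by
  intro l1 l2 c _
  unfold Spec_two_list_permutation
  exact final l1 l2 c
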